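-- pv_equiv track=rewrite | github.com/webbmaxwell/cs-guided-project-problem-solving | src/demonstration_04.py | emotify
-- ===== SOURCE A (Python) =====
-- def emotify(txt):
--     data = {
--         "smile": ":D",
--         "grin": ":)",
--         "sad": ":(",
--         "mad": ":P"
--     }
--
--     for k, v in data.items():
--         txt = txt.replace(k, v)
--
--     return txt
-- ===== SOURCE B (Python) =====
-- def emotify(txt):
--     rules = [("smile", ":D"), ("grin", ":)"), ("sad", ":("), ("mad", ":P")]
--     out = []
--     i = 0
--     n = len(txt)
--     while i < n:
--         for k, v in rules:
--             if txt.startswith(k, i):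
--                 out.append(v)
--                 i += len(k)
--                 break
--         else:
--             out.append(txt[i])
--             i += 1
--     return "".join(out)
-- ===== Notes on version B (the rewrite author's own statement) =====
-- stated objective: alternative
-- what changed: replaces A's four sequential full-string replace passes by a single left-to-right scan that at each position tries the four keywords in order and emits either the emoticon or the current character
import Mathlib
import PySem

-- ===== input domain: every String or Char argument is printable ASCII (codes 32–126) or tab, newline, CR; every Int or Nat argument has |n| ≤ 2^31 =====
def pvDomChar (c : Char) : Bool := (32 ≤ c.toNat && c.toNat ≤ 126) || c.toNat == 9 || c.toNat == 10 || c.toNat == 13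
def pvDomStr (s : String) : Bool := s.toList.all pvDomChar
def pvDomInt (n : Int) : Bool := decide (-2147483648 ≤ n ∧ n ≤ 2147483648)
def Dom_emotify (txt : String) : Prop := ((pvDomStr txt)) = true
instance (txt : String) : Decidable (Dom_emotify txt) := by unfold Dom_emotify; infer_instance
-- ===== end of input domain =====

-- B replaces A's four sequential full-string replace passes by one left-to-right scan
-- that tries the four keywords in order at each position (objective: alternative, same output).

-- ===== PORT A =====
def emotify (txt : String) : String :=
  (PySem.Dict.ofList [("smile", ":D"), ("grin", ":)"), ("sad", ":("), ("mad", ":P")] :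
      PySem.Dict String String).items.foldl
    (fun t kv => PySem.Str.replace t kv.1 kv.2) txt

-- ===== PORT B =====
-- single pass over the characters; at each position try the four keywords in order, else copy the char
def emotifyScan : List Char → List Char
  | [] => []
  | c :: t =>
    if ['s','m','i','l','e'].isPrefixOf (c :: t) then ':' :: 'D' :: emotifyScan (t.drop 4)
    else if ['g','r','i','n'].isPrefixOf (c :: t) then ':' :: ')' :: emotifyScan (t.drop 3)
    else if ['s','a','d'].isPrefixOf (c :: t) then ':' :: '(' :: emotifyScan (t.drop 2)
    else if ['m','a','d'].isPrefixOf (c :: t) then ':' :: 'P' :: emotifyScan (t.drop 2)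
    else c :: emotifyScan t
termination_by l => l.length
decreasing_by all_goals simp

def emotify_alt (txt : String) : String :=
  String.ofList (emotifyScan txt.toList)

-- ===== PRECONDITION & SPEC =====
def Spec_emotify (txt : String) (out : String) : Prop := out = emotify_alt txt
instance (txt : String) (out : String) : Decidable (Spec_emotify txt out) := by unfold Spec_emotify; infer_instance

-- ===== CLAIM (what is proved, stated in full; the proofs are below) =====
def Claim_equal_emotify : Prop := ∀ (txt : String), Dom_emotify txt → Spec_emotify txt (emotify txt)

-- ===== LEMMAS AND PROOFS =====

-- fuel-free version of PySem.Chars.replace for a nonempty key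
def repNE (k0 : Char) (ks new : List Char) : List Char → List Char
  | [] => []
  | c :: t =>
    if (k0 :: ks).isPrefixOf (c :: t) then new ++ repNE k0 ks new (t.drop ks.length)
    else c :: repNE k0 ks new t
termination_by l => l.length
decreasing_by all_goals simp

lemma replace_go_eq (k0 : Char) (ks new : List Char) :
    ∀ fuel l acc, l.length ≤ fuel →
      PySem.Chars.replace.go (k0 :: ks) new fuel l acc = acc.reverse ++ repNE k0 ks new l := by
  intro fuel
  induction fuel with
  | zero =>
    intro l acc h
    have : l = [] := List.eq_nil_of_length_eq_zero (Nat.le_zero.mp h)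
    subst this
    simp [PySem.Chars.replace.go, repNE]
  | succ n ih =>
    intro l acc h
    cases l with
    | nil => simp [PySem.Chars.replace.go, repNE]
    | cons c t =>
      by_cases hp : (k0 :: ks).isPrefixOf (c :: t) = true
      · rw [PySem.Chars.replace.go, if_pos hp, repNE, if_pos hp]
        rw [ih]
        · simp
        · simp at h ⊢; omega
      · rw [PySem.Chars.replace.go, if_neg hp, repNE, if_neg hp]
        rw [ih]
        · simp
        · simp at h; omega

lemma replace_eq_repNE (k0 : Char) (ks new l : List Char) :
    PySem.Chars.replace l (k0 :: ks) new = repNE k0 ks new l := by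
  rw [PySem.Chars.replace, if_neg (by simp)]
  exact replace_go_eq k0 ks new l.length l [] le_rfl

-- a pattern that cannot overlap the key and misses the replacement's head is matched
-- at the front of the output iff it is matched at the front of the input
lemma isPrefixOf_repNE (k0 nh : Char) (ks newt : List Char) :
    ∀ pat : List Char, nh ∉ pat →
      (∀ j, j < pat.length → ¬ (pat.drop j <+: (k0 :: ks)) ∧ ¬ ((k0 :: ks) <+: pat.drop j)) →
      ∀ l, pat.isPrefixOf (repNE k0 ks (nh :: newt) l) = pat.isPrefixOf l := by
  intro pat
  induction pat with
  | nil => intro _ _ l; simp [List.isPrefixOf]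
  | cons p ps ih =>
    intro hnh hov l
    cases l with
    | nil => simp [repNE]
    | cons c t =>
      by_cases hp : (k0 :: ks).isPrefixOf (c :: t) = true
      · rw [repNE, if_pos hp]
        have hkey : (k0 :: ks) <+: (c :: t) := List.isPrefixOf_iff_prefix.mp hp
        have hL : (p :: ps).isPrefixOf ((nh :: newt) ++ repNE k0 ks (nh :: newt) (t.drop ks.length)) = false := by
          simp only [List.cons_append, List.isPrefixOf]
          have : (p == nh) = false := by
            simp only [beq_eq_false_iff_ne]
            intro h; exact hnh (h ▸ List.mem_cons_self)
          simp [this]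
        rw [hL]
        by_cases hR : (p :: ps).isPrefixOf (c :: t) = true
        · exfalso
          have hpat : (p :: ps) <+: (c :: t) := List.isPrefixOf_iff_prefix.mp hR
          have := hov 0 (by simp)
          rcases List.prefix_or_prefix_of_prefix hpat hkey with h | h
          · exact this.1 h
          · exact this.2 h
        · simp only [Bool.not_eq_true] at hR
          exact hR.symm
      · rw [repNE, if_neg hp]
        simp only [List.isPrefixOf]
        by_cases hpc : (p == c) = true
        · simp only [hpc, Bool.true_and]
          exact ih (fun h => hnh (List.mem_cons_of_mem _ h))
            (fun j hj => by simpa using hov (j + 1) (by simpa using Nat.succ_lt_succ hj)) t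
        · simp [hpc]

-- the composite of A's four replaces
def comp4 (l : List Char) : List Char :=
  repNE 'm' ['a','d'] [':','P']
    (repNE 's' ['a','d'] [':','(']
      (repNE 'g' ['r','i','n'] [':',')']
        (repNE 's' ['m','i','l','e'] [':','D'] l)))

lemma grin_through_smile (l : List Char) :
    ['g','r','i','n'].isPrefixOf (repNE 's' ['m','i','l','e'] [':','D'] l)
      = ['g','r','i','n'].isPrefixOf l :=
  isPrefixOf_repNE _ _ _ _ _ (by decide) (by decide) l

lemma sad_through_smile (l : List Char) :
    ['s','a','d'].isPrefixOf (repNE 's' ['m','i','l','e'] [':','D'] l)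
      = ['s','a','d'].isPrefixOf l :=
  isPrefixOf_repNE _ _ _ _ _ (by decide) (by decide) l

lemma sad_through_grin (l : List Char) :
    ['s','a','d'].isPrefixOf (repNE 'g' ['r','i','n'] [':',')'] l)
      = ['s','a','d'].isPrefixOf l :=
  isPrefixOf_repNE _ _ _ _ _ (by decide) (by decide) l

lemma mad_through_smile (l : List Char) :
    ['m','a','d'].isPrefixOf (repNE 's' ['m','i','l','e'] [':','D'] l)
      = ['m','a','d'].isPrefixOf l :=
  isPrefixOf_repNE _ _ _ _ _ (by decide) (by decide) l

lemma mad_through_grin (l : List Char) :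
    ['m','a','d'].isPrefixOf (repNE 'g' ['r','i','n'] [':',')'] l)
      = ['m','a','d'].isPrefixOf l :=
  isPrefixOf_repNE _ _ _ _ _ (by decide) (by decide) l

lemma mad_through_sad (l : List Char) :
    ['m','a','d'].isPrefixOf (repNE 's' ['a','d'] [':','('] l)
      = ['m','a','d'].isPrefixOf l :=
  isPrefixOf_repNE _ _ _ _ _ (by decide) (by decide) l

lemma comp4_eq_scan : ∀ l, comp4 l = emotifyScan l := by
  intro l
  fun_induction emotifyScan l with
  | case1 => simp [comp4, repNE]
  | case2 c t h ih =>
    obtain ⟨u, hu⟩ := List.isPrefixOf_iff_prefix.mp h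
    cases hu
    simpa [comp4, repNE] using ih
  | case3 c t h1 h ih =>
    obtain ⟨u, hu⟩ := List.isPrefixOf_iff_prefix.mp h
    cases hu
    simpa [comp4, repNE] using ih
  | case4 c t h1 h2 h ih =>
    obtain ⟨u, hu⟩ := List.isPrefixOf_iff_prefix.mp h
    cases hu
    simpa [comp4, repNE] using ih
  | case5 c t h1 h2 h3 h ih =>
    obtain ⟨u, hu⟩ := List.isPrefixOf_iff_prefix.mp h
    cases hu
    simpa [comp4, repNE] using ih
  | case6 c t h1 h2 h3 h4 ih =>
    have e1 : repNE 's' ['m','i','l','e'] [':','D'] (c :: t)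
        = c :: repNE 's' ['m','i','l','e'] [':','D'] t := by
      rw [repNE, if_neg h1]
    have hg : ['g','r','i','n'].isPrefixOf (c :: repNE 's' ['m','i','l','e'] [':','D'] t) = false := by
      rw [← e1, grin_through_smile]
      exact Bool.not_eq_true _ ▸ h2
    have e2 : repNE 'g' ['r','i','n'] [':',')'] (c :: repNE 's' ['m','i','l','e'] [':','D'] t)
        = c :: repNE 'g' ['r','i','n'] [':',')'] (repNE 's' ['m','i','l','e'] [':','D'] t) := by
      rw [repNE, if_neg (by simp [hg])]
    have hs : ['s','a','d'].isPrefixOf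
        (c :: repNE 'g' ['r','i','n'] [':',')'] (repNE 's' ['m','i','l','e'] [':','D'] t)) = false := by
      rw [← e2, ← e1, sad_through_grin, sad_through_smile]
      exact Bool.not_eq_true _ ▸ h3
    have e3 : repNE 's' ['a','d'] [':','(']
          (c :: repNE 'g' ['r','i','n'] [':',')'] (repNE 's' ['m','i','l','e'] [':','D'] t))
        = c :: repNE 's' ['a','d'] [':','(']
            (repNE 'g' ['r','i','n'] [':',')'] (repNE 's' ['m','i','l','e'] [':','D'] t)) := by
      rw [repNE, if_neg (by simp [hs])]
    have hm : ['m','a','d'].isPrefixOf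
        (c :: repNE 's' ['a','d'] [':','(']
          (repNE 'g' ['r','i','n'] [':',')'] (repNE 's' ['m','i','l','e'] [':','D'] t))) = false := by
      rw [← e3, ← e2, ← e1, mad_through_sad, mad_through_grin, mad_through_smile]
      exact Bool.not_eq_true _ ▸ h4
    have e4 : repNE 'm' ['a','d'] [':','P']
          (c :: repNE 's' ['a','d'] [':','(']
            (repNE 'g' ['r','i','n'] [':',')'] (repNE 's' ['m','i','l','e'] [':','D'] t)))
        = c :: repNE 'm' ['a','d'] [':','P']
            (repNE 's' ['a','d'] [':','(']
              (repNE 'g' ['r','i','n'] [':',')'] (repNE 's' ['m','i','l','e'] [':','D'] t))) := by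
      rw [repNE, if_neg (by simp [hm])]
    rw [← ih]
    simp only [comp4, e1, e2, e3, e4]

-- ===== VERDICT (by name: the statement is the Claim_ definition above) =====
theorem emotify_spec : Claim_equal_emotify := by
  intro txt _
  unfold Spec_emotify emotify emotify_alt
  have hitems : (PySem.Dict.ofList
      [("smile", ":D"), ("grin", ":)"), ("sad", ":("), ("mad", ":P")] :
      PySem.Dict String String).items
      = [("smile", ":D"), ("grin", ":)"), ("sad", ":("), ("mad", ":P")] := by decide
  rw [hitems]
  simp only [List.foldl]
  rw [← comp4_eq_scan]
  simp only [PySem.Str.replace, String.toList_ofList]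
  have t1 : ("smile" : String).toList = 's' :: ['m','i','l','e'] := rfl
  have t2 : ("grin" : String).toList = 'g' :: ['r','i','n'] := rfl
  have t3 : ("sad" : String).toList = 's' :: ['a','d'] := rfl
  have t4 : ("mad" : String).toList = 'm' :: ['a','d'] := rfl
  rw [t1, t2, t3, t4, replace_eq_repNE, replace_eq_repNE, replace_eq_repNE, replace_eq_repNE]
  simp only [comp4]
  rfl
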